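-- pv_equiv track=rewrite | github.com/Jasonlee1995/LeetCode_Python | Solution/[1252][Easy] Cells with Odd Values in a Matrix.py | oddCells
-- ===== SOURCE A (Python) =====
-- def oddCells(m, n, indices):
--     row, col = [False] * m, [False] * n
--     for r, c in indices:
--         row[r] ^= True
--         col[c] ^= True
--
--     row_odd, row_even = sum(row), m - sum(row)
--     col_odd, col_even = sum(col), n - sum(col)
--
--     return row_odd * col_even + row_even * col_odd
-- ===== SOURCE B (Python) =====
-- def oddCells(m, n, indices):
--     matrix = [[0] * n for _ in range(m)]
--     for r, c in indices:
--         for j in range(n):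
--             matrix[r][j] += 1
--         for i in range(m):
--             matrix[i][c] += 1
--     count = 0
--     for row in matrix:
--         for v in row:
--             if v % 2 == 1:
--                 count += 1
--     return count
-- ===== Notes on version B (the rewrite author's own statement) =====
-- stated objective: alternative
-- what changed: B replaces A's combinatorial parity formula (toggle row/column parity bits, then row_odd*col_even + row_even*col_odd) with a direct simulation: it materializes the m-by-n grid, performs every increment, and counts cells whose value is odd.
import Mathlib
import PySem

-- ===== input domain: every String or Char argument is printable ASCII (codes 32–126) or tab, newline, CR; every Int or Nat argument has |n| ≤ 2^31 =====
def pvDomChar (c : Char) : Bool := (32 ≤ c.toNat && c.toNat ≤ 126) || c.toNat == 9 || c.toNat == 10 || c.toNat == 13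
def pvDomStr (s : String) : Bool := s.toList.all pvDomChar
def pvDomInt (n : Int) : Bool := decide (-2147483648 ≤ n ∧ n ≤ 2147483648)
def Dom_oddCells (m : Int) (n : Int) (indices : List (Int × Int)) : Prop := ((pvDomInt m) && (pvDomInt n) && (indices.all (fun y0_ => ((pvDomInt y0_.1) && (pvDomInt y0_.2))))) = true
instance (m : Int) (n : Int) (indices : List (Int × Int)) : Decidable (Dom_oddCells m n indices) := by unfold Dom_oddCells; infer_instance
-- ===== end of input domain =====

-- B replaces A's parity formula with a direct full-grid simulation (alternative algorithm, not faster).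

-- Python index resolution for list of length `len` (negative indices count from the end).
def pyNIdx (len : Nat) (i : Int) : Nat := (if i < 0 then i + len else i).toNat

-- ===== PORT A =====
-- row[i] ^= True
def toggleAt (xs : List Bool) (i : Int) : List Bool :=
  let j := pyNIdx xs.length i
  xs.set j (!(xs.getD j false))

def oddCells (m : Int) (n : Int) (indices : List (Int × Int)) : Int :=
  let st := indices.foldl (fun p rc => (toggleAt p.1 rc.1, toggleAt p.2 rc.2))
              (List.replicate m.toNat false, List.replicate n.toNat false)
  let rowOdd : Int := (st.1.count true : Nat)
  let colOdd : Int := (st.2.count true : Nat)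
  rowOdd * (n - colOdd) + (m - rowOdd) * colOdd

-- ===== PORT B =====
-- xs[i] += 1
def bumpAt (xs : List Int) (i : Int) : List Int :=
  let j := pyNIdx xs.length i
  xs.set j (xs.getD j 0 + 1)

-- one operation (r, c): increment row r, then increment column c
def applyOp (mat : List (List Int)) (r : Int) (c : Int) : List (List Int) :=
  let jr := pyNIdx mat.length r
  let mat2 := mat.set jr ((mat.getD jr []).map (· + 1))
  mat2.map (fun row => bumpAt row c)

def oddCells_alt (m : Int) (n : Int) (indices : List (Int × Int)) : Int :=
  let mat := indices.foldl (fun acc rc => applyOp acc rc.1 rc.2)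
               (List.replicate m.toNat (List.replicate n.toNat (0 : Int)))
  mat.foldl (fun acc row => acc + ((row.countP (fun v => v % 2 == 1) : Nat) : Int)) 0

-- ===== PRECONDITION & SPEC =====
-- Pre_ excludes exactly the inputs on which A raises IndexError: some (r, c) in indices
-- is not a valid Python index into the length-m row list or the length-n column list.
def Pre_oddCells (m : Int) (n : Int) (indices : List (Int × Int)) : Prop :=
  ∀ p ∈ indices, -m ≤ p.1 ∧ p.1 < m ∧ -n ≤ p.2 ∧ p.2 < n
instance (m : Int) (n : Int) (indices : List (Int × Int)) : Decidable (Pre_oddCells m n indices) := by unfold Pre_oddCells; infer_instance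

def pvWitness_oddCells : Int × Int × (List (Int × Int)) := (2, 3, [(0, 1), (1, 2), (-1, -3)])

def Spec_oddCells (m : Int) (n : Int) (indices : List (Int × Int)) (out : Int) : Prop := out = oddCells_alt m n indices
instance (m : Int) (n : Int) (indices : List (Int × Int)) (out : Int) : Decidable (Spec_oddCells m n indices out) := by unfold Spec_oddCells; infer_instance

-- ===== CLAIM (what is proved, stated in full; the proofs are below) =====
def Claim_equal_oddCells : Prop := ∀ (m : Int) (n : Int) (indices : List (Int × Int)), Dom_oddCells m n indices → Pre_oddCells m n indices → Spec_oddCells m n indices (oddCells m n indices)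

-- ===== LEMMAS AND PROOFS =====

-- parity predicate: Python `v % 2 == 1` (Int.emod, nonneg for divisor 2)
def par (a : Int) : Bool := a % 2 == 1

-- the grid whose cell (i, j) holds rc[i] + cc[j]
def grid (rc cc : List Int) : List (List Int) := rc.map (fun a => cc.map (fun b => a + b))

-- numeric state fold: both ports' loops reduce to this pair of count lists
def nf (idx : List (Int × Int)) (rc cc : List Int) : List Int × List Int :=
  idx.foldl (fun p x => (bumpAt p.1 x.1, bumpAt p.2 x.2)) (rc, cc)

theorem par_succ (a : Int) : par (a + 1) = !(par a) := by
  rcases Int.emod_two_eq a with h | h <;>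
    simp [par, Int.add_emod, h]

theorem toggle_par (rc : List Int) (i : Int) :
    toggleAt (rc.map par) i = (bumpAt rc i).map par := by
  unfold toggleAt bumpAt
  simp only [List.length_map]
  by_cases hj : pyNIdx rc.length i < rc.length
  · rw [List.getD_eq_getElem?_getD, List.getD_eq_getElem?_getD,
      List.getElem?_map, List.getElem?_eq_getElem hj, List.map_set]
    simp [par_succ]
  · rw [List.set_eq_of_length_le (by simpa using Nat.le_of_not_lt hj),
      List.set_eq_of_length_le (by simpa using Nat.le_of_not_lt hj)]

theorem bump_row_map (cc : List Int) (a c : Int) :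
    bumpAt (cc.map (fun b => a + b)) c = (bumpAt cc c).map (fun b => a + b) := by
  unfold bumpAt
  simp only [List.length_map]
  by_cases hj : pyNIdx cc.length c < cc.length
  · rw [List.getD_eq_getElem?_getD, List.getD_eq_getElem?_getD,
      List.getElem?_map, List.getElem?_eq_getElem hj, List.map_set]
    simp [add_assoc]
  · rw [List.set_eq_of_length_le (by simpa using Nat.le_of_not_lt hj),
      List.set_eq_of_length_le (by simpa using Nat.le_of_not_lt hj)]

theorem applyOp_grid (rc cc : List Int) (r c : Int) :
    applyOp (grid rc cc) r c = grid (bumpAt rc r) (bumpAt cc c) := by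
  unfold applyOp grid
  simp only [List.length_map]
  have hrow : (rc.map (fun a => cc.map (fun b => a + b))).set (pyNIdx rc.length r)
      (((rc.map (fun a => cc.map (fun b => a + b))).getD (pyNIdx rc.length r) []).map (· + 1))
      = (bumpAt rc r).map (fun a => cc.map (fun b => a + b)) := by
    unfold bumpAt
    by_cases hj : pyNIdx rc.length r < rc.length
    · simp only [List.getD_eq_getElem?_getD, List.getElem?_map,
        List.getElem?_eq_getElem hj, Option.map_some, Option.getD_some,
        List.map_set, List.map_map]
      congr 1
      refine List.map_congr_left ?_
      intro b _
      simp only [Function.comp_apply]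
      ring
    · rw [List.set_eq_of_length_le (by simpa using Nat.le_of_not_lt hj),
        List.set_eq_of_length_le (by simpa using Nat.le_of_not_lt hj)]
  rw [hrow, List.map_map]
  congr 1
  funext a
  exact bump_row_map cc a c

theorem nf_cons (x : Int × Int) (idx : List (Int × Int)) (rc cc : List Int) :
    nf (x :: idx) rc cc = nf idx (bumpAt rc x.1) (bumpAt cc x.2) := rfl

theorem foldA_par (idx : List (Int × Int)) : ∀ rc cc : List Int,
    idx.foldl (fun p rc => (toggleAt p.1 rc.1, toggleAt p.2 rc.2)) (rc.map par, cc.map par)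
      = ((nf idx rc cc).1.map par, (nf idx rc cc).2.map par) := by
  induction idx with
  | nil => intro rc cc; rfl
  | cons x t ih =>
      intro rc cc
      rw [List.foldl_cons, nf_cons]
      simp only
      rw [toggle_par, toggle_par, ih]

theorem foldB_grid (idx : List (Int × Int)) : ∀ rc cc : List Int,
    idx.foldl (fun acc rc => applyOp acc rc.1 rc.2) (grid rc cc)
      = grid (nf idx rc cc).1 (nf idx rc cc).2 := by
  induction idx with
  | nil => intro rc cc; rfl
  | cons x t ih =>
      intro rc cc
      rw [List.foldl_cons, nf_cons, applyOp_grid, ih]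

theorem nf_lengths (idx : List (Int × Int)) : ∀ rc cc : List Int,
    (nf idx rc cc).1.length = rc.length ∧ (nf idx rc cc).2.length = cc.length := by
  induction idx with
  | nil => intro rc cc; exact ⟨rfl, rfl⟩
  | cons x t ih =>
      intro rc cc
      rw [nf_cons]
      simpa [bumpAt] using ih (bumpAt rc x.1) (bumpAt cc x.2)

theorem countP_row (cc : List Int) (a : Int) :
    ((cc.map (fun b => a + b)).countP (fun v => v % 2 == 1) : Int)
      = if par a then (cc.length : Int) - cc.countP par else cc.countP par := by
  induction cc with
  | nil => simp
  | cons b t ih =>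
      by_cases hb : par b <;> by_cases ha : par a <;>
        · have hab : par (a + b) = xor (par a) (par b) := by
            rcases Int.emod_two_eq a with h1 | h1 <;> rcases Int.emod_two_eq b with h2 | h2 <;>
              simp [par, Int.add_emod, h1, h2]
          simp only [List.map_cons, List.countP_cons, List.length_cons, par] at ih ⊢
          push_cast
          simp only [show ((a + b) % 2 == 1) = xor (a % 2 == 1) (b % 2 == 1) from by
            rcases Int.emod_two_eq a with h1 | h1 <;> rcases Int.emod_two_eq b with h2 | h2 <;>
              simp [Int.add_emod, h1, h2]] at *
          simp_all
          omega

theorem sum_grid (cc : List Int) : ∀ (rc : List Int) (acc : Int),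
    (grid rc cc).foldl (fun acc row => acc + ((row.countP (fun v => v % 2 == 1) : Nat) : Int)) acc
      = acc + (rc.countP par : Int) * ((cc.length : Int) - cc.countP par)
          + ((rc.length : Int) - rc.countP par) * (cc.countP par : Int) := by
  intro rc
  induction rc with
  | nil => intro acc; simp [grid]
  | cons a t ih =>
      intro acc
      simp only [grid, List.map_cons, List.foldl_cons] at ih ⊢
      rw [ih]
      rw [countP_row]
      by_cases ha : par a <;>
        · simp only [List.countP_cons, List.length_cons, ha]
          push_cast
          simp only [par] at ha
          simp
          ring

theorem countP_zero_replicate (k : Nat) : (List.replicate k (0 : Int)).countP par = 0 := by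
  induction k with
  | zero => rfl
  | succ k ih => simp [List.replicate_succ, par, ih]

theorem replicate_false (k : Nat) :
    List.replicate k false = (List.replicate k (0 : Int)).map par := by
  simp [List.map_replicate, par]

theorem grid_zero (mk nk : Nat) :
    grid (List.replicate mk (0 : Int)) (List.replicate nk (0 : Int))
      = List.replicate mk (List.replicate nk (0 : Int)) := by
  simp [grid, List.map_replicate]

theorem count_true_map_par (l : List Int) : (l.map par).count true = l.countP par := by
  rw [List.count_eq_countP, List.countP_map]
  simp [Function.comp_def]

-- ===== VERDICT (by name: the statement is the Claim_ definition above) =====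
theorem oddCells_spec : Claim_equal_oddCells := by
  intro m n indices _ hpre
  unfold Spec_oddCells oddCells oddCells_alt
  simp only
  set rc0 : List Int := List.replicate m.toNat 0 with hrc0
  set cc0 : List Int := List.replicate n.toNat 0 with hcc0
  have hA := foldA_par indices rc0 cc0
  have hB := foldB_grid indices rc0 cc0
  rw [replicate_false m.toNat, replicate_false n.toNat, ← hrc0, ← hcc0, hA]
  rw [← grid_zero m.toNat n.toNat, ← hrc0, ← hcc0, hB]
  rw [sum_grid]
  set rcF := (nf indices rc0 cc0).1
  set ccF := (nf indices rc0 cc0).2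
  have hlen := nf_lengths indices rc0 cc0
  have hlr : rcF.length = m.toNat := by simpa [hrc0] using hlen.1
  have hlc : ccF.length = n.toNat := by simpa [hcc0] using hlen.2
  rw [count_true_map_par, count_true_map_par, hlr, hlc]
  by_cases hmn : 0 < m ∧ 0 < n
  · rw [Int.toNat_of_nonneg (le_of_lt hmn.1), Int.toNat_of_nonneg (le_of_lt hmn.2)]
    ring
  · -- some dimension is ≤ 0, so Pre_ forces indices = [] and both sides are 0
    have hemp : indices = [] := by
      cases indices with
      | nil => rfl
      | cons p t =>
          exfalso
          have := hpre p (List.mem_cons_self ..)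
          exact hmn ⟨by omega, by omega⟩
    subst hemp
    have h1 : rcF = rc0 := rfl
    have h2 : ccF = cc0 := rfl
    rw [h1, h2, hrc0, hcc0, countP_zero_replicate, countP_zero_replicate]
    ring
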